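-- pv_equiv track=rewrite | github.com/salvaderron/CodeChef-Problems | Snake Procession.py | is_valid_report
-- ===== SOURCE A (Python) =====
-- def is_valid_report(arr):
--     state = 0  # 0 means expecting 'H' or '.', 1 means expecting 'T'
--
--     for char in arr:
--         if char == 'H':
--             if state != 0:
--                 return "Invalid"
--             state = 1
--         elif char == 'T':
--             if state != 1:
--                 return "Invalid"
--             state = 0
--
--     if state == 1:
--         return "Invalid"
--
--     return "Valid"
-- ===== SOURCE B (Python) =====
-- def is_valid_report(arr):
--     sig = [c for c in arr if c in ('H', 'T')]
--     return "Valid" if sig == ['H', 'T'] * (len(sig) // 2) else "Invalid"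
-- ===== Notes on version B (the rewrite author's own statement) =====
-- stated objective: simpler
-- what changed: Replaced the state-machine loop with early returns by an extract-then-compare two-phase check: filter out the head/tail characters and compare the filtered list against the repeated alternating head-tail pattern of matching length.
import Mathlib
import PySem

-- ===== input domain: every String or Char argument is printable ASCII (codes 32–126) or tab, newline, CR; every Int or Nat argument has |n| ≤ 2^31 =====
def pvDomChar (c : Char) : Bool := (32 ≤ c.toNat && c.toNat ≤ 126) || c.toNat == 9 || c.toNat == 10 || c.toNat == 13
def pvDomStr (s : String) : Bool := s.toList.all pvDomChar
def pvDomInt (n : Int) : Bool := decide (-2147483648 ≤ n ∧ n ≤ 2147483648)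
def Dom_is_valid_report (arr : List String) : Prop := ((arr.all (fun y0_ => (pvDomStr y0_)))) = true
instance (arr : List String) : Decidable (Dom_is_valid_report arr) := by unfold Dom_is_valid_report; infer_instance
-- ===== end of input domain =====

-- B replaces A's state-machine loop by filtering the 'H'/'T' characters and comparing
-- against the repeated alternating head-tail pattern: simpler two-phase decomposition, same O(n).


-- ===== PORT A =====
-- state machine: state = 0 expecting 'H' (or other chars), state = 1 expecting 'T'
def pvAgo (state : Int) (l : List String) : String :=
  match l with
  | [] => if state = 1 then "Invalid" else "Valid"
  | c :: rest =>
    if c = "H" then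
      if state ≠ 0 then "Invalid" else pvAgo 1 rest
    else if c = "T" then
      if state ≠ 1 then "Invalid" else pvAgo 0 rest
    else pvAgo state rest

def is_valid_report (arr : List String) : String := pvAgo 0 arr

-- ===== PORT B =====
def is_valid_report_alt (arr : List String) : String :=
  let sig := arr.filter (fun c => c == "H" || c == "T")
  if sig = (List.replicate (sig.length / 2) ["H", "T"]).flatten then "Valid" else "Invalid"

-- ===== PRECONDITION & SPEC =====
def Spec_is_valid_report (arr : List String) (out : String) : Prop := out = is_valid_report_alt arr
instance (arr : List String) (out : String) : Decidable (Spec_is_valid_report arr out) := by unfold Spec_is_valid_report; infer_instance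

-- ===== CLAIM (what is proved, stated in full; the proofs are below) =====
def Claim_equal_is_valid_report : Prop := ∀ (arr : List String), Dom_is_valid_report arr → Spec_is_valid_report arr (is_valid_report arr)

-- ===== LEMMAS AND PROOFS =====

-- the alternating checker: v false = "expecting H", v true = "expecting T"
def pvV : Bool → List String → Bool
  | b, [] => !b
  | false, c :: r => c == "H" && pvV true r
  | true, c :: r => c == "T" && pvV false r

def pvPat (k : Nat) : List String := (List.replicate k ["H", "T"]).flatten

theorem pvPat_succ (k : Nat) : pvPat (k + 1) = "H" :: "T" :: pvPat k := by
  simp [pvPat, List.replicate_succ]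

theorem pvPat_length (k : Nat) : (pvPat k).length = 2 * k := by
  induction k with
  | zero => rfl
  | succ n ih => rw [pvPat_succ]; simp [ih]; omega

-- A's state machine equals the checker on the filtered list
theorem pvAgo_eq_v (l : List String) (b : Bool) :
    pvAgo (if b then 1 else 0) l =
      (if pvV b (l.filter (fun c => c == "H" || c == "T")) then "Valid" else "Invalid") := by
  induction l generalizing b with
  | nil => cases b <;> simp [pvAgo, pvV]
  | cons c rest ih =>
    by_cases hH : c = "H"
    · subst hH
      cases b
      · simpa [pvAgo, pvV] using ih true
      · simp [pvAgo, pvV]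
    · by_cases hT : c = "T"
      · subst hT
        cases b
        · simp [pvAgo, pvV]
        · simpa [pvAgo, pvV] using ih false
      · have hc : (c == "H" || c == "T") = false := by
          simp [hH, hT]
        cases b
        · simpa [pvAgo, hH, hT, hc] using ih false
        · simpa [pvAgo, hH, hT, hc] using ih true

-- the checker characterised by the pattern
theorem pvV_iff (l : List String) :
    (pvV false l = true ↔ ∃ k, l = pvPat k) ∧
    (pvV true l = true ↔ ∃ k, l = "T" :: pvPat k) := by
  induction l with
  | nil =>
    constructor
    · simp [pvV]; exact ⟨0, rfl⟩
    · simp [pvV]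
  | cons c rest ih =>
    constructor
    · constructor
      · intro h
        simp only [pvV, Bool.and_eq_true, beq_iff_eq] at h
        obtain ⟨hc, hv⟩ := h
        obtain ⟨k, hk⟩ := ih.2.mp hv
        exact ⟨k + 1, by rw [pvPat_succ, hc, hk]⟩
      · rintro ⟨k, hk⟩
        cases k with
        | zero => simp [pvPat] at hk
        | succ n =>
          rw [pvPat_succ] at hk
          injection hk with h1 h2
          simp [pvV, h1]
          exact ih.2.mpr ⟨n, h2⟩
    · constructor
      · intro h
        simp only [pvV, Bool.and_eq_true, beq_iff_eq] at h
        obtain ⟨hc, hv⟩ := h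
        obtain ⟨k, hk⟩ := ih.1.mp hv
        exact ⟨k, by rw [hc, hk]⟩
      · rintro ⟨k, hk⟩
        injection hk with h1 h2
        simp [pvV, h1]
        exact ih.1.mpr ⟨k, h2⟩

theorem pvV_eq_pat (l : List String) :
    (pvV false l = true) ↔ l = pvPat (l.length / 2) := by
  rw [(pvV_iff l).1]
  constructor
  · rintro ⟨k, rfl⟩
    rw [pvPat_length]
    congr 1
    omega
  · intro h; exact ⟨_, h⟩

-- ===== VERDICT (by name: the statement is the Claim_ definition above) =====
theorem is_valid_report_spec : Claim_equal_is_valid_report := by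
  intro arr _
  unfold Spec_is_valid_report is_valid_report is_valid_report_alt
  have h := pvAgo_eq_v arr false
  simp only [Bool.false_eq_true, if_false] at h
  rw [h]
  simp only [pvV_eq_pat, pvPat]
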